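-- pv_equiv track=rewrite | github.com/ZIJIAN004/UniCOP | UniCOP-Reason/tests/test_dry_vectorized.py | compute_penalties_ref
-- ===== SOURCE A (Python) =====
-- def compute_penalties_ref(context, allowed_length, multiplier, base, max_match):
--     n = len(context)
--     if n < 2:
--         return {}
--     m = [0] * n
--     for p in range(n):
--         L = 0
--         while (
--             L < max_match
--             and p - L >= 0
--             and n - 1 - L >= 0
--             and context[p - L] == context[n - 1 - L]
--         ):
--             L += 1
--         m[p] = L
--     best = {}
--     for p in range(n - 1):
--         tok = context[p]
--         L_ext = m[p - 1] + 1 if p >= 1 else 1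
--         if tok not in best or L_ext > best[tok]:
--             best[tok] = L_ext
--     out = {}
--     for tok, L in best.items():
--         if L > allowed_length:
--             out[tok] = multiplier * (base ** (L - allowed_length))
--     return out
-- ===== SOURCE B (Python) =====
-- def compute_penalties_ref(context, allowed_length, multiplier, base, max_match):
--     n = len(context)
--     if n < 2:
--         return {}
--     # layer-by-layer ("vectorized") computation of the suffix-match lengths:
--     # after layer L, a position is alive iff its match still extends past length L.
--     state = [(0, True)] * n
--     L = 0
--     while L < max_match and any(a for _, a in state):
--         state = [
--             (v + 1, True)
--             if a and p >= L and context[p - L] == context[n - 1 - L]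
--             else (v, False)
--             for p, (v, a) in enumerate(state)
--         ]
--         L += 1
--     m = [v for v, _ in state]
--     best = {}
--     for p in range(n - 1):
--         tok = context[p]
--         L_ext = (m[p - 1] if p else 0) + 1
--         if best.get(tok, 0) < L_ext:
--             best[tok] = L_ext
--     return {tok: multiplier * base ** (L - allowed_length)
--             for tok, L in best.items() if L > allowed_length}
-- ===== Notes on version B (the rewrite author's own statement) =====
-- stated objective: alternative
-- what changed: A computes each position's suffix-match length with its own inner while loop (row by row); B computes all match lengths together, layer by layer, sweeping the whole position array once per match depth L while maintaining an alive flag per position (the vectorized formulation), and builds the penalty dict with get-based max updates and comprehensions.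
import Mathlib
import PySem

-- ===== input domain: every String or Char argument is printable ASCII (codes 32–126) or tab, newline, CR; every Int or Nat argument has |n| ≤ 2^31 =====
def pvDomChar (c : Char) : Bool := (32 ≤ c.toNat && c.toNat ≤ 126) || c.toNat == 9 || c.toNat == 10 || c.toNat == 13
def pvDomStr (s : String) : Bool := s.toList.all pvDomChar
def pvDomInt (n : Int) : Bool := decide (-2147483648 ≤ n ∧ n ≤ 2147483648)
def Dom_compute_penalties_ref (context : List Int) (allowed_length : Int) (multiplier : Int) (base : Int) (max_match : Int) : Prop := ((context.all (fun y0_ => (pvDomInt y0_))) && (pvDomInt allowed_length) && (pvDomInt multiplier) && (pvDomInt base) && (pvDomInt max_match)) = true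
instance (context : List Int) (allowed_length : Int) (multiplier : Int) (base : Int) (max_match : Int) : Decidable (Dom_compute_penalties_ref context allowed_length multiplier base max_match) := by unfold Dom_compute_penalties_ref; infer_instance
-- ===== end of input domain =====

-- B replaces A's per-position inner while loop by a layer-by-layer ("vectorized") sweep that
-- computes all suffix-match lengths at once; alternative algorithm of the same asymptotic cost.


set_option maxHeartbeats 1000000

-- ===== PORT A =====
-- the condition of A's inner while loop
def pvCondA (c : List Int) (n mm p L : Int) : Bool :=
  decide (L < mm ∧ 0 ≤ p - L ∧ 0 ≤ n - 1 - L ∧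
    PySem.List.pyGet? c (p - L) = PySem.List.pyGet? c (n - 1 - L))

-- A's inner while loop, on its exact termination measure as structural fuel:
-- when the fuel is 0 the loop condition is false (proved in pvCondA_false below)
def pvLoopAF (c : List Int) (n mm p : Int) : Nat → Int → Int
  | 0, L => L
  | (k + 1), L => if pvCondA c n mm p L = true then pvLoopAF c n mm p k (L + 1) else L

def pvLoopA (c : List Int) (n mm p L : Int) : Int :=
  pvLoopAF c n mm p (min (p + 1) mm - L).toNat L

def compute_penalties_ref (context : List Int) (allowed_length : Int) (multiplier : Int) (base : Int) (max_match : Int) : List (Int × Int) :=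
  let n : Int := context.length
  if n < 2 then []
  else
    let m : List Int := (List.range context.length).map (fun (p : Nat) => pvLoopA context n max_match (p : Int) 0)
    let best : PySem.Dict Int Int := (List.range (context.length - 1)).foldl
      (fun (d : PySem.Dict Int Int) (p : Nat) =>
        if ¬ d.contains (PySem.List.pyGetD context (p : Int) 0) = true ∨
            d.getD (PySem.List.pyGetD context (p : Int) 0) 0 <
              (if p ≥ 1 then PySem.List.pyGetD m ((p : Int) - 1) 0 + 1 else 1)
        then d.insert (PySem.List.pyGetD context (p : Int) 0)
              (if p ≥ 1 then PySem.List.pyGetD m ((p : Int) - 1) 0 + 1 else 1)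
        else d)
      PySem.Dict.empty
    let out : PySem.Dict Int Int := best.items.foldl
      (fun d tl => if allowed_length < tl.2 then d.insert tl.1 (multiplier * base ^ (tl.2 - allowed_length).toNat) else d)
      PySem.Dict.empty
    out.items

-- ===== PORT B =====
-- one layer of B's sweep: enumerate the state array, extend alive matches at depth L
def pvStepB (c : List Int) (n L : Int) (st : List (Int × Bool)) : List (Int × Bool) :=
  st.zipIdx.map (fun pr =>
    if pr.1.2 && decide ((pr.2 : Int) ≥ L) &&
        decide (PySem.List.pyGet? c ((pr.2 : Int) - L) = PySem.List.pyGet? c (n - 1 - L))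
    then (pr.1.1 + 1, true) else (pr.1.1, false))

-- B's while loop over layers L = 0, 1, …, on its exact termination measure as structural fuel
def pvLayersBF (c : List Int) (n mm : Int) : Nat → Int → List (Int × Bool) → List (Int × Bool)
  | 0, _, st => st
  | (k + 1), L, st =>
    if L < mm ∧ st.any (fun x => x.2) = true then pvLayersBF c n mm k (L + 1) (pvStepB c n L st)
    else st

def pvLayersB (c : List Int) (n mm L : Int) (st : List (Int × Bool)) : List (Int × Bool) :=
  pvLayersBF c n mm (mm - L).toNat L st

def compute_penalties_ref_alt (context : List Int) (allowed_length : Int) (multiplier : Int) (base : Int) (max_match : Int) : List (Int × Int) :=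
  let n : Int := context.length
  if n < 2 then []
  else
    let st := pvLayersB context n max_match 0 (List.replicate context.length (0, true))
    let m : List Int := st.map (fun x => x.1)
    let best : PySem.Dict Int Int := (List.range (context.length - 1)).foldl
      (fun (d : PySem.Dict Int Int) (p : Nat) =>
        if d.getD (PySem.List.pyGetD context (p : Int) 0) 0 <
            (if p ≠ 0 then PySem.List.pyGetD m ((p : Int) - 1) 0 else 0) + 1
        then d.insert (PySem.List.pyGetD context (p : Int) 0)
              ((if p ≠ 0 then PySem.List.pyGetD m ((p : Int) - 1) 0 else 0) + 1)
        else d)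
      PySem.Dict.empty
    (best.items.filter (fun tl => allowed_length < tl.2)).map
      (fun tl => (tl.1, multiplier * base ^ (tl.2 - allowed_length).toNat))

-- ===== PRECONDITION & SPEC =====
def Spec_compute_penalties_ref (context : List Int) (allowed_length : Int) (multiplier : Int) (base : Int) (max_match : Int) (out : List (Int × Int)) : Prop := out = compute_penalties_ref_alt context allowed_length multiplier base max_match
instance (context : List Int) (allowed_length : Int) (multiplier : Int) (base : Int) (max_match : Int) (out : List (Int × Int)) : Decidable (Spec_compute_penalties_ref context allowed_length multiplier base max_match out) := by unfold Spec_compute_penalties_ref; infer_instance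

-- ===== CLAIM (what is proved, stated in full; the proofs are below) =====
def Claim_equal_compute_penalties_ref : Prop := ∀ (context : List Int) (allowed_length : Int) (multiplier : Int) (base : Int) (max_match : Int), Dom_compute_penalties_ref context allowed_length multiplier base max_match → Spec_compute_penalties_ref context allowed_length multiplier base max_match (compute_penalties_ref context allowed_length multiplier base max_match)

-- ===== LEMMAS AND PROOFS =====

-- the loop condition is false once the fuel measure is exhausted
theorem pvCondA_false (c : List Int) (n mm p L : Int) (h : (min (p + 1) mm - L).toNat = 0) :
    pvCondA c n mm p L = false := by
  by_cases hc : pvCondA c n mm p L = true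
  · simp only [pvCondA, decide_eq_true_eq] at hc
    omega
  · simpa using hc

-- A's inner loop never decreases L
theorem pvLoopAF_ge (c : List Int) (n mm p : Int) :
    ∀ (k : Nat) (L : Int), L ≤ pvLoopAF c n mm p k L := by
  intro k
  induction k with
  | zero => intro L; simp [pvLoopAF]
  | succ k ih =>
    intro L
    simp only [pvLoopAF]
    split_ifs with hc
    · have := ih (L + 1)
      omega
    · omega

theorem pvLoopA_ge (c : List Int) (n mm p L : Int) : L ≤ pvLoopA c n mm p L :=
  pvLoopAF_ge c n mm p _ L

-- the condition fails at the value where A's loop stops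
theorem pvLoopAF_stop (c : List Int) (n mm p : Int) :
    ∀ (k : Nat) (L : Int), (min (p + 1) mm - L).toNat ≤ k →
      pvCondA c n mm p (pvLoopAF c n mm p k L) = false := by
  intro k
  induction k with
  | zero =>
    intro L hk
    simp only [pvLoopAF]
    exact pvCondA_false c n mm p L (by omega)
  | succ k ih =>
    intro L hk
    simp only [pvLoopAF]
    split_ifs with hc
    · apply ih
      have := hc
      simp only [pvCondA, decide_eq_true_eq] at this
      omega
    · simpa using hc

theorem pvLoopA_stop (c : List Int) (n mm p L : Int) :
    pvCondA c n mm p (pvLoopA c n mm p L) = false :=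
  pvLoopAF_stop c n mm p _ L le_rfl

-- the condition holds at every index the loop stepped through
theorem pvLoopAF_steps (c : List Int) (n mm p : Int) :
    ∀ (k : Nat) (L : Int), ∀ i, L ≤ i → i < pvLoopAF c n mm p k L → pvCondA c n mm p i = true := by
  intro k
  induction k with
  | zero =>
    intro L i h1 h2
    simp only [pvLoopAF] at h2
    exact absurd h2 (by omega)
  | succ k ih =>
    intro L i h1 h2
    simp only [pvLoopAF] at h2
    split_ifs at h2 with hc
    · by_cases hi : i = L
      · rwa [hi]
      · exact ih (L + 1) i (by omega) h2
    · exact absurd h2 (by omega)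

theorem pvLoopA_steps (c : List Int) (n mm p L : Int) :
    ∀ i, L ≤ i → i < pvLoopA c n mm p L → pvCondA c n mm p i = true :=
  pvLoopAF_steps c n mm p _ L

theorem pvLoopA_le_mm (c : List Int) (n mm p : Int) (h : 0 < pvLoopA c n mm p 0) :
    pvLoopA c n mm p 0 ≤ mm := by
  have hs := pvLoopA_steps c n mm p 0 (pvLoopA c n mm p 0 - 1) (by omega) (by omega)
  simp only [pvCondA, decide_eq_true_eq] at hs
  obtain ⟨h1, -, -, -⟩ := hs
  omega

theorem pvLoopA_succ (c : List Int) (n mm p L : Int) (h1 : L ≤ pvLoopA c n mm p 0)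
    (h2 : pvCondA c n mm p L = true) : L + 1 ≤ pvLoopA c n mm p 0 := by
  by_contra hc
  have he : pvLoopA c n mm p 0 = L := by omega
  have hs := pvLoopA_stop c n mm p 0
  rw [he, h2] at hs
  simp at hs

-- the state B's layer loop holds after layer L, expressed through A's loop values
def pvInvSt (c : List Int) (mm L : Int) : List (Int × Bool) :=
  (List.range c.length).map (fun (p : Nat) =>
    (min (pvLoopA c (c.length : Int) mm (p : Int) 0) L,
     decide (L ≤ pvLoopA c (c.length : Int) mm (p : Int) 0)))

theorem pvStepB_inv (c : List Int) (mm L : Int) (hL : 0 ≤ L) (hmm : L < mm) :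
    pvStepB c (c.length : Int) L (pvInvSt c mm L) = pvInvSt c mm (L + 1) := by
  apply List.ext_getElem
  · simp [pvStepB, pvInvSt]
  · intro i h1 h2
    have hlen : i < c.length := by simpa [pvInvSt] using h2
    have hci : (i : Int) < (c.length : Int) := by exact_mod_cast hlen
    simp only [pvStepB, pvInvSt, List.getElem_map, List.getElem_zipIdx, List.getElem_range,
      Nat.zero_add]
    have hiff : L + 1 ≤ pvLoopA c (c.length : Int) mm (i : Int) 0 ↔
        (L ≤ pvLoopA c (c.length : Int) mm (i : Int) 0 ∧ (i : Int) ≥ L ∧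
          PySem.List.pyGet? c ((i : Int) - L) = PySem.List.pyGet? c ((c.length : Int) - 1 - L)) := by
      constructor
      · intro h
        have hc := pvLoopA_steps c (c.length : Int) mm (i : Int) 0 L hL (by omega)
        simp only [pvCondA, decide_eq_true_eq] at hc
        exact ⟨by omega, by omega, hc.2.2.2⟩
      · rintro ⟨hb1, hb2, hb3⟩
        apply pvLoopA_succ c (c.length : Int) mm (i : Int) L hb1
        simp only [pvCondA, decide_eq_true_eq]
        exact ⟨hmm, by omega, by omega, hb3⟩
    by_cases hb : L + 1 ≤ pvLoopA c (c.length : Int) mm (i : Int) 0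
    · obtain ⟨c1, c2, c3⟩ := hiff.mp hb
      rw [if_pos (by simp [c1, c2, c3])]
      simp only [Prod.mk.injEq]
      exact ⟨by omega, by simp [hb]⟩
    · rw [if_neg ?_]
      · simp only [Prod.mk.injEq]
        have hble : ¬ (L + 1 ≤ pvLoopA c (c.length : Int) mm (i : Int) 0) := hb
        exact ⟨by omega, by simp [hb]⟩
      · intro hcond
        simp only [Bool.and_eq_true, decide_eq_true_eq] at hcond
        exact hb (hiff.mpr ⟨hcond.1.1, hcond.1.2, hcond.2⟩)

theorem pvInvSt_fst (c : List Int) (mm L : Int)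
    (h : ∀ p : Nat, p < c.length → pvLoopA c (c.length : Int) mm (p : Int) 0 ≤ L) :
    (pvInvSt c mm L).map (fun x => x.1)
      = (List.range c.length).map (fun (p : Nat) => pvLoopA c (c.length : Int) mm (p : Int) 0) := by
  simp only [pvInvSt, List.map_map]
  apply List.map_congr_left
  intro p hp
  simp only [List.mem_range] at hp
  simp only [Function.comp_apply]
  have := h p hp
  omega

theorem pvLayersBF_inv (c : List Int) (mm : Int) :
    ∀ (k : Nat) (L : Int), 0 ≤ L → (mm - L).toNat ≤ k →
      (pvLayersBF c (c.length : Int) mm k L (pvInvSt c mm L)).map (fun x => x.1)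
        = (List.range c.length).map (fun (p : Nat) => pvLoopA c (c.length : Int) mm (p : Int) 0) := by
  intro k
  induction k with
  | zero =>
    intro L hL hk
    simp only [pvLayersBF]
    apply pvInvSt_fst
    intro p hp
    by_cases h0 : 0 < pvLoopA c (c.length : Int) mm (p : Int) 0
    · have := pvLoopA_le_mm c (c.length : Int) mm (p : Int) h0
      omega
    · have := pvLoopA_ge c (c.length : Int) mm (p : Int) 0
      omega
  | succ k ih =>
    intro L hL hk
    simp only [pvLayersBF]
    split_ifs with h
    · rw [pvStepB_inv c mm L hL h.1]
      exact ih (L + 1) (by omega) (by omega)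
    · apply pvInvSt_fst
      intro p hp
      by_cases hm : L < mm
      · have hany : (pvInvSt c mm L).any (fun x => x.2) = false := by
          rcases Bool.eq_false_or_eq_true ((pvInvSt c mm L).any (fun x => x.2)) with hx | hx
          · exact absurd ⟨hm, hx⟩ h
          · exact hx
        have hmem : ((min (pvLoopA c (c.length : Int) mm (p : Int) 0) L,
            decide (L ≤ pvLoopA c (c.length : Int) mm (p : Int) 0))) ∈ pvInvSt c mm L := by
          simp only [pvInvSt]
          exact List.mem_map_of_mem (List.mem_range.mpr hp)
        have := List.any_eq_false.mp hany _ hmem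
        simp only [decide_eq_true_eq] at this
        omega
      · by_cases h0 : 0 < pvLoopA c (c.length : Int) mm (p : Int) 0
        · have := pvLoopA_le_mm c (c.length : Int) mm (p : Int) h0
          omega
        · have := pvLoopA_ge c (c.length : Int) mm (p : Int) 0
          omega

-- a dict lookup with a default returns the default when the key is absent
theorem pvGetD_not_contains (d : PySem.Dict Int Int) (k dflt : Int)
    (h : d.contains k = false) : d.getD k dflt = dflt := by
  have h2 : d.get? k = none := by
    have hc := PySem.Dict.contains_eq_isSome_get? d k
    rw [h] at hc
    exact Option.not_isSome_iff_eq_none.mp (by simp [← hc])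
  simp [PySem.Dict.getD, h2]

-- inserting at a different key does not create a key
theorem pvContains_insert_of_ne (d : PySem.Dict Int Int) (k k' v : Int) (hne : k' ≠ k)
    (h : d.contains k' = false) : (d.insert k v).contains k' = false := by
  rw [PySem.Dict.contains_eq_isSome_get?] at h ⊢
  rw [PySem.Dict.get?_insert_of_ne]
  · exact h
  · exact hne

-- the two best-dict loops agree step by step
theorem pvBest_eq (c M : List Int) (hM : ∀ x ∈ M, (0 : Int) ≤ x) :
    (List.range (c.length - 1)).foldl
      (fun (d : PySem.Dict Int Int) (p : Nat) =>
        if ¬ d.contains (PySem.List.pyGetD c (p : Int) 0) = true ∨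
            d.getD (PySem.List.pyGetD c (p : Int) 0) 0 <
              (if p ≥ 1 then PySem.List.pyGetD M ((p : Int) - 1) 0 + 1 else 1)
        then d.insert (PySem.List.pyGetD c (p : Int) 0)
              (if p ≥ 1 then PySem.List.pyGetD M ((p : Int) - 1) 0 + 1 else 1)
        else d)
      PySem.Dict.empty
    = (List.range (c.length - 1)).foldl
      (fun (d : PySem.Dict Int Int) (p : Nat) =>
        if d.getD (PySem.List.pyGetD c (p : Int) 0) 0 <
            (if p ≠ 0 then PySem.List.pyGetD M ((p : Int) - 1) 0 else 0) + 1
        then d.insert (PySem.List.pyGetD c (p : Int) 0)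
              ((if p ≠ 0 then PySem.List.pyGetD M ((p : Int) - 1) 0 else 0) + 1)
        else d)
      PySem.Dict.empty := by
  apply PySem.List.foldl_congr_mem'
  intro p hp d
  have hLext : (if p ≥ 1 then PySem.List.pyGetD M ((p : Int) - 1) 0 + 1 else 1)
      = (if p ≠ 0 then PySem.List.pyGetD M ((p : Int) - 1) 0 else 0) + 1 := by
    by_cases h0 : p = 0
    · subst h0; simp
    · have h1 : p ≥ 1 := Nat.one_le_iff_ne_zero.mpr h0
      rw [if_pos h1, if_pos h0]
  have hpos : (0 : Int) < (if p ≠ 0 then PySem.List.pyGetD M ((p : Int) - 1) 0 else 0) + 1 := by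
    by_cases h0 : p = 0
    · simp [h0]
    · rw [if_pos h0]
      have h1 : ((p : Int) - 1) = ((p - 1 : Nat) : Int) := by omega
      rw [h1, PySem.List.pyGetD_natCast]
      have hge : (0 : Int) ≤ M.getD (p - 1) 0 := by
        rcases Nat.lt_or_ge (p - 1) M.length with hlt | hge
        · rw [List.getD_eq_getElem _ _ hlt]
          exact hM _ (List.getElem_mem _)
        · rw [List.getD_eq_default _ _ hge]
      omega
  rw [hLext]
  by_cases hc : d.contains (PySem.List.pyGetD c (p : Int) 0) = true
  · have he : (¬ d.contains (PySem.List.pyGetD c (p : Int) 0) = true ∨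
        d.getD (PySem.List.pyGetD c (p : Int) 0) 0 <
          (if p ≠ 0 then PySem.List.pyGetD M ((p : Int) - 1) 0 else 0) + 1) ↔
        (d.getD (PySem.List.pyGetD c (p : Int) 0) 0 <
          (if p ≠ 0 then PySem.List.pyGetD M ((p : Int) - 1) 0 else 0) + 1) :=
      or_iff_right (not_not_intro hc)
    rw [if_congr he rfl rfl]
  · have hc' : d.contains (PySem.List.pyGetD c (p : Int) 0) = false := by simpa using hc
    have hg : d.getD (PySem.List.pyGetD c (p : Int) 0) 0 = 0 := pvGetD_not_contains _ _ _ hc'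
    have hcond2 : d.getD (PySem.List.pyGetD c (p : Int) 0) 0 <
        (if p ≠ 0 then PySem.List.pyGetD M ((p : Int) - 1) 0 else 0) + 1 := by
      rw [hg]; exact hpos
    rw [if_pos (Or.inl hc), if_pos hcond2]

-- a conditional-insert loop keeps the keys list duplicate-free
theorem pvNodup_keys_condInsert {β : Type} (q : PySem.Dict Int Int → β → Prop)
    [inst : ∀ d x, Decidable (q d x)] (k : β → Int) (v : β → Int) :
    ∀ (l : List β) (d : PySem.Dict Int Int), d.keys.Nodup →
      (l.foldl (fun d x => if q d x then d.insert (k x) (v x) else d) d).keys.Nodup := by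
  intro l
  induction l with
  | nil => intro d h; simpa using h
  | cons x xs ih =>
    intro d h
    simp only [List.foldl_cons]
    by_cases hx : q d x
    · rw [if_pos hx]
      exact ih _ (PySem.Dict.nodup_keys_insert _ _ _ h)
    · rw [if_neg hx]
      exact ih _ h

-- A's out-dict loop over fresh distinct keys produces exactly B's filter-then-map list
theorem pvOutFold (al mult base : Int) :
    ∀ (l : List (Int × Int)) (d : PySem.Dict Int Int),
      (∀ a ∈ l, d.contains a.1 = false) → (l.map (fun tl => tl.1)).Nodup →
      (l.foldl
          (fun d tl => if al < tl.2 then d.insert tl.1 (mult * base ^ (tl.2 - al).toNat) else d)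
          d).items
        = d.items ++ (l.filter (fun tl => al < tl.2)).map
            (fun tl => (tl.1, mult * base ^ (tl.2 - al).toNat)) := by
  intro l
  induction l with
  | nil => intro d _ _; simp
  | cons x xs ih =>
    intro d hcont hnd
    simp only [List.map_cons, List.nodup_cons] at hnd
    obtain ⟨hx1, hnd'⟩ := hnd
    simp only [List.foldl_cons]
    by_cases hx : al < x.2
    · rw [if_pos hx]
      rw [ih _ ?_ hnd']
      · rw [PySem.Dict.items_insert_of_not_contains]
        · rw [List.filter_cons_of_pos (by simpa using hx)]
          simp [List.append_assoc]
        · exact hcont x List.mem_cons_self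
      · intro a ha
        refine pvContains_insert_of_ne _ _ _ _ ?_ (hcont a (List.mem_cons_of_mem _ ha))
        intro he
        exact hx1 (he ▸ List.mem_map_of_mem ha)
    · rw [if_neg hx, List.filter_cons_of_neg (by simpa using hx)]
      exact ih _ (fun a ha => hcont a (List.mem_cons_of_mem _ ha)) hnd'

theorem pvOut_eq (al mult base : Int) (bd : PySem.Dict Int Int) (h : bd.keys.Nodup) :
    (bd.items.foldl
        (fun d tl => if al < tl.2 then d.insert tl.1 (mult * base ^ (tl.2 - al).toNat) else d)
        PySem.Dict.empty).items
      = (bd.items.filter (fun tl => al < tl.2)).map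
          (fun tl => (tl.1, mult * base ^ (tl.2 - al).toNat)) := by
  have hnd : (bd.items.map (fun tl => tl.1)).Nodup := by
    simpa [PySem.Dict.keys] using h
  have := pvOutFold al mult base bd.items PySem.Dict.empty
    (fun a _ => PySem.Dict.contains_empty _) hnd
  simpa using this

-- ===== VERDICT (by name: the statement is the Claim_ definition above) =====
theorem compute_penalties_ref_spec : Claim_equal_compute_penalties_ref := by
  intro c al mult base mm _
  show compute_penalties_ref c al mult base mm = compute_penalties_ref_alt c al mult base mm
  by_cases h2 : (c.length : Int) < 2
  · simp [compute_penalties_ref, compute_penalties_ref_alt, h2]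
  · simp only [compute_penalties_ref, compute_penalties_ref_alt, if_neg h2]
    have h0 : List.replicate c.length ((0 : Int), true) = pvInvSt c mm 0 := by
      symm
      rw [List.eq_replicate_iff]
      constructor
      · simp [pvInvSt]
      · intro b hb
        simp only [pvInvSt, List.mem_map, List.mem_range] at hb
        obtain ⟨p, hp, rfl⟩ := hb
        have := pvLoopA_ge c (c.length : Int) mm (p : Int) 0
        simp only [Prod.mk.injEq]
        exact ⟨by omega, by simp [this]⟩
    have hm : (pvLayersB c (c.length : Int) mm 0 (List.replicate c.length ((0 : Int), true))).map (fun x => x.1)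
        = (List.range c.length).map (fun (p : Nat) => pvLoopA c (c.length : Int) mm (p : Int) 0) := by
      rw [h0]
      exact pvLayersBF_inv c mm (mm - 0).toNat 0 (by omega) (by omega)
    rw [hm]
    have hM : ∀ x ∈ (List.range c.length).map (fun (p : Nat) => pvLoopA c (c.length : Int) mm (p : Int) 0),
        (0 : Int) ≤ x := by
      intro x hx
      simp only [List.mem_map, List.mem_range] at hx
      obtain ⟨p, -, rfl⟩ := hx
      exact pvLoopA_ge c (c.length : Int) mm (p : Int) 0
    rw [pvBest_eq c _ hM]
    exact pvOut_eq al mult base _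
      (pvNodup_keys_condInsert _ _ _ _ _ PySem.Dict.nodup_keys_empty)
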